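-- pv_equiv track=rewrite | github.com/necst/trilli | common/generator/generator.py | convert_to_MSWLSW
-- ===== SOURCE A (Python) =====
-- def convert_to_MSWLSW(bitarray):
--     LSW = 0
--     MSW = 0
--
--     r = 128 - len(bitarray)
--     assert r >= 0, "too many bits"
--
--     bitarray = bitarray + [0] * r
--
--     for i, b in enumerate(bitarray):
--         if i < 64:
--             LSW += 2**i if b else 0
--         else:
--             MSW += 2**(i-64) if b else 0
--
--     return f"{{{LSW}ULL, {MSW}ULL}}"
-- ===== SOURCE B (Python) =====
-- def convert_to_MSWLSW(bitarray):
--     r = 128 - len(bitarray)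
--     assert r >= 0, "too many bits"
--     bits = bitarray + [0] * r
--
--     def word(chunk):
--         v = 0
--         for b in reversed(chunk):
--             v = 2 * v + (1 if b else 0)
--         return v
--
--     return f"{{{word(bits[:64])}ULL, {word(bits[64:])}ULL}}"
-- ===== Notes on version B (the rewrite author's own statement) =====
-- stated objective: alternative
-- what changed: Replaces the single indexed loop over all 128 positions (enumerate, i<64 branch, explicit 2**i powers) by slicing the padded array into the two 64-bit halves and Horner-folding each half back-to-front (v = 2*v + bit), with no index, no branch and no power computation.
import Mathlib
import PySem

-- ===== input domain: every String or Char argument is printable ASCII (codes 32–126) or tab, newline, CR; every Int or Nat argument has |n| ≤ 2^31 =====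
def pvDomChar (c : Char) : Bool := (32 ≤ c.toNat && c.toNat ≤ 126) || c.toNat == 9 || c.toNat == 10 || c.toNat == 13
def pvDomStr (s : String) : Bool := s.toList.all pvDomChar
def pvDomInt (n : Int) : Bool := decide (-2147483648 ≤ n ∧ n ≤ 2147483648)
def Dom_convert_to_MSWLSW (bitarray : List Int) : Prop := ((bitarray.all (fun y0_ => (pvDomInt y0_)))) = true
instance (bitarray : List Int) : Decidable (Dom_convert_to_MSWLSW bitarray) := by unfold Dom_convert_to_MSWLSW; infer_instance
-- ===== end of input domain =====

-- B replaces A's indexed loop (enumerate, i<64 branch, 2**i powers) by Horner folds over the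
-- reversed 64-bit slices of the padded array; return value only, no observable mutation.

-- ===== PORT A =====
-- literal port of A: pad to 128 with zeros, then one indexed loop accumulating powers of two.
-- '2**i' with the nonnegative enumerate index i is ported as '2 ^ i.toNat' (exact: i ≥ 0 here).
def convert_to_MSWLSW (bitarray : List Int) : String :=
  let r : Int := 128 - (bitarray.length : Int)
  let bits := bitarray ++ List.replicate r.toNat 0
  let p : Int × Int := (PySem.List.enumerate bits).foldl
    (fun (p : Int × Int) (ib : Int × Int) =>
      if ib.1 < 64 then (p.1 + (if ib.2 ≠ 0 then 2 ^ ib.1.toNat else 0), p.2)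
      else (p.1, p.2 + (if ib.2 ≠ 0 then 2 ^ (ib.1 - 64).toNat else 0))) (0, 0)
  "{" ++ PySem.Int.toStr p.1 ++ "ULL, " ++ PySem.Int.toStr p.2 ++ "ULL}"

-- ===== PORT B =====
-- 'word' of Source B: Horner fold over the reversed chunk
def pvWord (chunk : List Int) : Int :=
  chunk.reverse.foldl (fun v b => 2 * v + (if b ≠ 0 then 1 else 0)) 0

def convert_to_MSWLSW_alt (bitarray : List Int) : String :=
  let r : Int := 128 - (bitarray.length : Int)
  let bits := bitarray ++ List.replicate r.toNat 0
  "{" ++ PySem.Int.toStr (pvWord (PySem.List.slice bits none (some 64))) ++ "ULL, "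
      ++ PySem.Int.toStr (pvWord (PySem.List.slice bits (some 64) none)) ++ "ULL}"

-- ===== PRECONDITION & SPEC =====
-- Pre_ excludes only the inputs on which A's (and B's) assert fires: more than 128 bits.
def Pre_convert_to_MSWLSW (bitarray : List Int) : Prop := bitarray.length ≤ 128
instance (bitarray : List Int) : Decidable (Pre_convert_to_MSWLSW bitarray) := by
  unfold Pre_convert_to_MSWLSW; infer_instance
def pvWitness_convert_to_MSWLSW : List Int := [1, 0, 1, 1]

def Spec_convert_to_MSWLSW (bitarray : List Int) (out : String) : Prop := out = convert_to_MSWLSW_alt bitarray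
instance (bitarray : List Int) (out : String) : Decidable (Spec_convert_to_MSWLSW bitarray out) := by unfold Spec_convert_to_MSWLSW; infer_instance

-- ===== CLAIM (what is proved, stated in full; the proofs are below) =====
def Claim_equal_convert_to_MSWLSW : Prop := ∀ (bitarray : List Int), Dom_convert_to_MSWLSW bitarray → Pre_convert_to_MSWLSW bitarray → Spec_convert_to_MSWLSW bitarray (convert_to_MSWLSW bitarray)

-- ===== LEMMAS AND PROOFS =====

theorem pvWord_nil : pvWord [] = 0 := rfl

theorem pvWord_cons (x : Int) (l : List Int) :
    pvWord (x :: l) = 2 * pvWord l + (if x ≠ 0 then 1 else 0) := by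
  simp [pvWord, List.foldl_append]

-- A's loop body as a named step for the lemmas
def pvStepA (p : Int × Int) (ib : Int × Int) : Int × Int :=
  if ib.1 < 64 then (p.1 + (if ib.2 ≠ 0 then 2 ^ ib.1.toNat else 0), p.2)
  else (p.1, p.2 + (if ib.2 ≠ 0 then 2 ^ (ib.1 - 64).toNat else 0))

theorem pvFold_hi (l : List Int) : ∀ (n : Nat) (p : Int × Int), 64 ≤ n →
    (PySem.List.enumerate l (n : Int)).foldl pvStepA p
      = (p.1, p.2 + 2 ^ (n - 64) * pvWord l) := by
  induction l with
  | nil => intro n p _; simp [PySem.List.enumerate_nil, pvWord_nil]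
  | cons x xs ih =>
    intro n p hn
    rw [PySem.List.enumerate_cons]
    have hc : ((n : Int) + 1) = ((n + 1 : Nat) : Int) := by push_cast; ring
    simp only [List.foldl_cons, hc, ih (n + 1) _ (by omega)]
    have hlt : ¬ ((n : Int) < 64) := by omega
    have ht : ((n : Int) - 64).toNat = n - 64 := by omega
    simp only [pvStepA, hlt, if_false, ht, pvWord_cons]
    have hs : n + 1 - 64 = (n - 64) + 1 := by omega
    rw [hs, pow_succ, Prod.mk.injEq]
    refine ⟨rfl, by split_ifs <;> ring⟩

theorem pvFold_lo (l : List Int) : ∀ (n : Nat) (p : Int × Int), n ≤ 64 →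
    (PySem.List.enumerate l (n : Int)).foldl pvStepA p
      = (p.1 + 2 ^ n * pvWord (l.take (64 - n)), p.2 + pvWord (l.drop (64 - n))) := by
  induction l with
  | nil => intro n p _; simp [PySem.List.enumerate_nil, pvWord_nil]
  | cons x xs ih =>
    intro n p hn
    rcases eq_or_lt_of_le hn with h64 | hlt
    · subst h64
      have := pvFold_hi (x :: xs) 64 p (le_refl 64)
      simpa [pvWord_nil] using this
    · rw [PySem.List.enumerate_cons]
      have hc : ((n : Int) + 1) = ((n + 1 : Nat) : Int) := by push_cast; ring
      simp only [List.foldl_cons, hc, ih (n + 1) _ (by omega)]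
      have hl : ((n : Int) < 64) := by omega
      have ht : ((n : Int)).toNat = n := by omega
      simp only [pvStepA, hl, if_true, ht]
      have htk : 64 - n = (64 - (n + 1)) + 1 := by omega
      rw [htk, List.take_succ_cons, List.drop_succ_cons, pvWord_cons, pow_succ, Prod.mk.injEq]
      refine ⟨by split_ifs <;> ring, rfl⟩

-- ===== VERDICT (by name: the statement is the Claim_ definition above) =====
theorem pvFold_zero (l : List Int) :
    (PySem.List.enumerate l 0).foldl pvStepA (0, 0)
      = (pvWord (l.take 64), pvWord (l.drop 64)) := by
  have h := pvFold_lo l 0 (0, 0) (by omega)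
  rw [Nat.cast_zero] at h
  rw [h]
  norm_num

theorem convert_to_MSWLSW_spec : Claim_equal_convert_to_MSWLSW := by
  intro bitarray _ _
  unfold Spec_convert_to_MSWLSW convert_to_MSWLSW convert_to_MSWLSW_alt
  have hfun : (fun (p : Int × Int) (ib : Int × Int) =>
      if ib.1 < 64 then (p.1 + (if ib.2 ≠ 0 then 2 ^ ib.1.toNat else 0), p.2)
      else (p.1, p.2 + (if ib.2 ≠ 0 then 2 ^ (ib.1 - 64).toNat else 0))) = pvStepA := rfl
  simp only [hfun]
  rw [PySem.List.slice_to _ (by norm_num), PySem.List.slice_from _ (by norm_num), pvFold_zero]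
  norm_num [show Int.toNat 64 = 64 from rfl]
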